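-- pv_equiv track=rewrite | github.com/jatorrey/codigoCubosInteligenciaArtificial | cubos.py | resolver_cubos
-- ===== SOURCE A (Python) =====
-- from collections import deque
--
-- cubos = ['A', 'B', 'C']
--
-- def mover_cubo(estado, cubo, destino):
--     nuevo_estado = estado.copy()
--     nuevo_estado[cubo] = destino
--     return nuevo_estado
--
-- def movimientos_validos(estado):
--     movimientos = []
--     for cubo in cubos:
--         # Si el cubo está en la mesa, podemos moverlo a cualquier otro cubo
--         if estado[cubo] == 'mesa':
--             for otro_cubo in cubos:
--                 if otro_cubo != cubo and estado[otro_cubo] == 'mesa':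
--                     movimientos.append((cubo, otro_cubo))
--         else:
--             # Si el cubo está sobre otro cubo, podemos moverlo a la mesa
--             movimientos.append((cubo, 'mesa'))
--     return movimientos
--
-- def resolver_cubos(estado_inicial, estado_final):
--     stack = deque([(estado_inicial, [])])  # pila de búsqueda con estado y plan
--     visitados = set()
--
--     while stack:
--         estado_actual, plan = stack.pop()
--         estado_tupla = tuple(sorted(estado_actual.items()))  # convertir estado en tupla para verificación
--
--         if estado_tupla in visitados:
--             continue
--
--         visitados.add(estado_tupla)
--
--         # Verificamos si hemos llegado al estado final
--         if estado_actual == estado_final: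
--             return plan
--
--         # Generar movimientos y actualizar el plan
--         for cubo, destino in movimientos_validos(estado_actual):
--             nuevo_estado = mover_cubo(estado_actual, cubo, destino)
--             nuevo_plan = plan + [(cubo, destino)]
--             stack.append((nuevo_estado, nuevo_plan))
--
--     return None
-- ===== SOURCE B (Python) =====
-- cubos = ['A', 'B', 'C']
--
-- def mover_cubo(estado, cubo, destino):
--     nuevo_estado = estado.copy()
--     nuevo_estado[cubo] = destino
--     return nuevo_estado
--
-- def movimientos_validos(estado):
--     movimientos = []
--     for cubo in cubos:
--         if estado[cubo] == 'mesa':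
--             for otro_cubo in cubos:
--                 if otro_cubo != cubo and estado[otro_cubo] == 'mesa':
--                     movimientos.append((cubo, otro_cubo))
--         else:
--             movimientos.append((cubo, 'mesa'))
--     return movimientos
--
-- def resolver_cubos(estado_inicial, estado_final):
--     # recursive depth-first search; a shared visited set replaces A's explicit stack
--     visitados = set()
--
--     def dfs(estado, plan):
--         clave = tuple(sorted(estado.items()))
--         if clave in visitados:
--             return None
--         visitados.add(clave)
--         if estado == estado_final:
--             return plan
--         for cubo, destino in reversed(movimientos_validos(estado)):
--             res = dfs(mover_cubo(estado, cubo, destino), plan + [(cubo, destino)])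
--             if res is not None:
--                 return res
--         return None
--
--     return dfs(estado_inicial, [])
-- ===== Notes on version B (the rewrite author's own statement) =====
-- stated objective: alternative
-- what changed: Replaces A's explicit LIFO stack of (state, plan) pairs by a recursive depth-first search: a shared visited set and a recursive dfs(estado, plan) helper that tries the valid moves in reversed order and returns the first successful recursive result.
import Mathlib
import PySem

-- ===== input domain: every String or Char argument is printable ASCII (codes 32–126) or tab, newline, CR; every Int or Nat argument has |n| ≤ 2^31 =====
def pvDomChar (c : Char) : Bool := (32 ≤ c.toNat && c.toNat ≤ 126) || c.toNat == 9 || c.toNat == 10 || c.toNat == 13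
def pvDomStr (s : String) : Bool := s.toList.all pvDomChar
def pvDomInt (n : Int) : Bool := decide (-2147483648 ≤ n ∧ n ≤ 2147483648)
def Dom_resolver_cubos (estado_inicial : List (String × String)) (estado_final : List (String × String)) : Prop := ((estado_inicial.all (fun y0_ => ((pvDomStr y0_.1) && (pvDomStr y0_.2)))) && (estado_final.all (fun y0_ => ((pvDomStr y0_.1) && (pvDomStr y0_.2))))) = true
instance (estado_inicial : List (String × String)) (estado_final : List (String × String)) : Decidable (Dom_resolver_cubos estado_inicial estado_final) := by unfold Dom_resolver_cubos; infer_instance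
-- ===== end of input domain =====

-- B replaces A's explicit LIFO stack by a recursive depth-first search with a shared visited
-- set (objective: alternative decomposition, same exact plans and tie-breaking).
-- Both ports carry a fuel counter only to make the search total in Lean (the proof shows
-- 5000 steps are never exhausted on inputs satisfying Pre_).

-- shared helpers (same-module helpers of A, used verbatim by B as well)
def pvCubos : List String := ["A", "B", "C"]

def pvMoverCubo (estado : PySem.Dict String String) (cubo destino : String) : PySem.Dict String String :=
  estado.insert cubo destino

def pvMovimientosValidos (estado : PySem.Dict String String) : List (String × String) :=
  pvCubos.foldl (fun movimientos cubo =>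
    if estado.getD cubo "" == "mesa" then
      pvCubos.foldl (fun movs otro_cubo =>
        if otro_cubo != cubo && (estado.getD otro_cubo "" == "mesa") then movs ++ [(cubo, otro_cubo)] else movs) movimientos
    else movimientos ++ [(cubo, "mesa")]) []

-- tuple(sorted(estado.items())) : lexicographic sort of the item pairs
def pvClave (estado : PySem.Dict String String) : List (String × String) :=
  PySem.List.sorted2 estado.items Prod.fst Prod.snd

-- Python's `dict == dict` (order-insensitive): same key set and same value at every key
def pvDictEq (d1 d2 : PySem.Dict String String) : Bool :=
  PySem.Set.equal d1.keys d2.keys && d1.keys.all (fun k => d1.get? k == d2.get? k)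

-- fuel: ≥ 10·343 + 2 loop iterations / recursion depth are provably sufficient (see lemmas)
def pvFuel : Nat := 5000

-- ===== PORT A =====
def pvLoopA (fin : PySem.Dict String String) :
    Nat → List (PySem.Dict String String × List (String × String)) →
    List (List (String × String)) → Option (List (String × String))
  | 0, _, _ => none
  | _ + 1, [], _ => none
  | f + 1, (estado_actual, plan) :: rest, visitados =>
    let estado_tupla := pvClave estado_actual
    if PySem.Set.contains visitados estado_tupla then
      pvLoopA fin f rest visitados
    else
      let visitados' := PySem.Set.add visitados estado_tupla
      if pvDictEq estado_actual fin then some plan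
      else
        pvLoopA fin f
          ((pvMovimientosValidos estado_actual).foldl
            (fun st m => (pvMoverCubo estado_actual m.1 m.2, plan ++ [m]) :: st) rest)
          visitados'

def resolver_cubos (estado_inicial : List (String × String)) (estado_final : List (String × String)) : Option (List (String × String)) :=
  pvLoopA ⟨estado_final⟩ pvFuel [(⟨estado_inicial⟩, [])] PySem.Set.empty

-- ===== PORT B =====
-- the `for … in reversed(movimientos_validos(estado))` loop of dfs, with the recursive
-- call `dfsf` (= dfs at one less fuel) passed in; the visited set is threaded through
def pvGoStep
    (dfsf : PySem.Dict String String → List (String × String) → List (List (String × String)) →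
            Option (List (String × String)) × List (List (String × String))) :
    List (String × String) → PySem.Dict String String → List (String × String) →
    List (List (String × String)) → Option (List (String × String)) × List (List (String × String))
  | [], _, _, visitados => (none, visitados)
  | m :: ms, estado, plan, visitados =>
    match dfsf (pvMoverCubo estado m.1 m.2) (plan ++ [m]) visitados with
    | (some res, v2) => (some res, v2)
    | (none, v2) => pvGoStep dfsf ms estado plan v2

def pvDfs (fin : PySem.Dict String String) :
    Nat → PySem.Dict String String → List (String × String) →
    List (List (String × String)) → Option (List (String × String)) × List (List (String × String))
  | 0, _, _, visitados => (none, visitados)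
  | f + 1, estado, plan, visitados =>
    let clave := pvClave estado
    if PySem.Set.contains visitados clave then (none, visitados)
    else
      let visitados' := PySem.Set.add visitados clave
      if pvDictEq estado fin then (some plan, visitados')
      else pvGoStep (pvDfs fin f) (pvMovimientosValidos estado).reverse estado plan visitados'

def resolver_cubos_alt (estado_inicial : List (String × String)) (estado_final : List (String × String)) : Option (List (String × String)) :=
  (pvDfs ⟨estado_final⟩ pvFuel ⟨estado_inicial⟩ [] PySem.Set.empty).1

-- ===== PRECONDITION & SPEC =====
-- Pre_ asks that the two association lists have duplicate-free keys (so they represent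
-- genuine Python dicts) and that A terminates without a KeyError: either the cubes
-- 'A','B','C' are all keys of estado_inicial, or the two dicts are already equal
-- (in which case A returns [] before ever indexing the state).
def Pre_resolver_cubos (estado_inicial : List (String × String)) (estado_final : List (String × String)) : Prop :=
  (estado_inicial.map Prod.fst).Nodup ∧ (estado_final.map Prod.fst).Nodup ∧
  (("A" ∈ estado_inicial.map Prod.fst ∧ "B" ∈ estado_inicial.map Prod.fst ∧ "C" ∈ estado_inicial.map Prod.fst) ∨
    pvDictEq ⟨estado_inicial⟩ ⟨estado_final⟩ = true)

instance (estado_inicial : List (String × String)) (estado_final : List (String × String)) : Decidable (Pre_resolver_cubos estado_inicial estado_final) := by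
  unfold Pre_resolver_cubos; infer_instance

def pvWitness_resolver_cubos : (List (String × String)) × (List (String × String)) :=
  ([("A", "mesa"), ("B", "mesa"), ("C", "mesa")], [("A", "B"), ("B", "mesa"), ("C", "mesa")])

def Spec_resolver_cubos (estado_inicial : List (String × String)) (estado_final : List (String × String)) (out : Option (List (String × String))) : Prop := out = resolver_cubos_alt estado_inicial estado_final
instance (estado_inicial : List (String × String)) (estado_final : List (String × String)) (out : Option (List (String × String))) : Decidable (Spec_resolver_cubos estado_inicial estado_final out) := by unfold Spec_resolver_cubos; infer_instance

-- ===== CLAIM (what is proved, stated in full; the proofs are below) =====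
def Claim_equal_resolver_cubos : Prop := ∀ (estado_inicial : List (String × String)) (estado_final : List (String × String)), Dom_resolver_cubos estado_inicial estado_final → Pre_resolver_cubos estado_inicial estado_final → Spec_resolver_cubos estado_inicial estado_final (resolver_cubos estado_inicial estado_final)

-- ===== LEMMAS AND PROOFS =====

-- the finite state space: every state A or B ever visits is the initial dict with the
-- values of keys "A","B","C" replaced by elements of a fixed 7-element value list
def pvSubst (a b c : String) (p : String × String) : String × String :=
  if p.1 == "A" then ("A", a) else if p.1 == "B" then ("B", b) else if p.1 == "C" then ("C", c) else p

def pvState (e0 : PySem.Dict String String) (a b c : String) : PySem.Dict String String :=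
  ⟨e0.items.map (pvSubst a b c)⟩

def pvVL (e0 : PySem.Dict String String) : List String :=
  [e0.getD "A" "", e0.getD "B" "", e0.getD "C" "", "mesa", "A", "B", "C"]

def pvAll (e0 : PySem.Dict String String) : List (List (String × String)) :=
  (pvVL e0).flatMap fun a => (pvVL e0).flatMap fun b => (pvVL e0).map fun c => pvClave (pvState e0 a b c)

def pvM (e0 : PySem.Dict String String) : Nat := (pvAll e0).length

def pvSt (e0 e : PySem.Dict String String) : Prop :=
  ∃ a ∈ pvVL e0, ∃ b ∈ pvVL e0, ∃ c ∈ pvVL e0, e = pvState e0 a b c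

def pvInv (e0 : PySem.Dict String String) (v : List (List (String × String))) : Prop :=
  v.Nodup ∧ ∀ x ∈ v, x ∈ pvAll e0

def pvKeysABC (e0 : PySem.Dict String String) : Prop :=
  "A" ∈ e0.keys ∧ "B" ∈ e0.keys ∧ "C" ∈ e0.keys

-- sequential processing of a list of (state, plan) entries by B's dfs (proof device)
def pvRunL (fin : PySem.Dict String String) (f : Nat) :
    List (PySem.Dict String String × List (String × String)) →
    List (List (String × String)) → Option (List (String × String)) × List (List (String × String))
  | [], v => (none, v)
  | (e, p) :: rest, v =>
    match pvDfs fin f e p v with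
    | (some r, v2) => (some r, v2)
    | (none, v2) => pvRunL fin f rest v2

theorem pvSubst_fst (a b c : String) (p : String × String) : (pvSubst a b c p).1 = p.1 := by
  unfold pvSubst; split_ifs with h1 h2 h3 <;> simp_all

theorem pvState_keys (e0 : PySem.Dict String String) (a b c : String) :
    (pvState e0 a b c).keys = e0.keys := by
  simp [pvState, PySem.Dict.keys, List.map_map, Function.comp_def, pvSubst_fst]

set_option maxRecDepth 8192 in
theorem pvM_eq (e0 : PySem.Dict String String) : pvM e0 = 343 := by
  rw [pvM, pvAll]; simp [pvVL]

theorem pvMovs_eq (e : PySem.Dict String String) :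
    pvMovimientosValidos e = pvCubos.flatMap (fun cubo =>
      if e.getD cubo "" == "mesa" then
        (pvCubos.filter (fun o => o != cubo && (e.getD o "" == "mesa"))).map (fun o => (cubo, o))
      else [(cubo, "mesa")]) := by
  unfold pvMovimientosValidos
  have hb : (fun (movimientos : List (String × String)) (cubo : String) =>
      if e.getD cubo "" == "mesa" then
        pvCubos.foldl (fun movs otro_cubo =>
          if otro_cubo != cubo && (e.getD otro_cubo "" == "mesa") then movs ++ [(cubo, otro_cubo)] else movs) movimientos
      else movimientos ++ [(cubo, "mesa")])
      = (fun movimientos cubo => movimientos ++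
          (if e.getD cubo "" == "mesa" then
            (pvCubos.filter (fun o => o != cubo && (e.getD o "" == "mesa"))).map (fun o => (cubo, o))
          else [(cubo, "mesa")])) := by
    funext movs cubo
    by_cases h : e.getD cubo "" == "mesa"
    · simp only [h, if_true, PySem.List.foldl_append_if]
    · simp only [h, Bool.false_eq_true, if_false]
  rw [hb, PySem.List.foldl_append_eq_flatMap, List.nil_append]

theorem pvMovs_mem {e : PySem.Dict String String} {m : String × String}
    (hm : m ∈ pvMovimientosValidos e) : m.1 ∈ pvCubos ∧ (m.2 = "mesa" ∨ m.2 ∈ pvCubos) := by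
  rw [pvMovs_eq] at hm
  rcases List.mem_flatMap.1 hm with ⟨cubo, hcubo, hmm⟩
  by_cases h : e.getD cubo "" == "mesa"
  · simp only [h, if_true] at hmm
    rcases List.mem_map.1 hmm with ⟨o, ho, rfl⟩
    exact ⟨hcubo, Or.inr (List.mem_of_mem_filter ho)⟩
  · simp only [h, Bool.false_eq_true, if_false, List.mem_singleton] at hmm
    subst hmm
    exact ⟨hcubo, Or.inl rfl⟩

theorem pvMovs_len (e : PySem.Dict String String) : (pvMovimientosValidos e).length ≤ 9 := by
  have hG : ∀ cubo : String, (if e.getD cubo "" == "mesa" then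
      ((["A", "B", "C"] : List String).filter (fun o => o != cubo && (e.getD o "" == "mesa"))).map (fun o => (cubo, o))
      else [(cubo, "mesa")]).length ≤ 3 := by
    intro cubo
    split
    · simpa using (List.length_filter_le _ (["A", "B", "C"] : List String)).trans (by simp)
    · simp
  rw [pvMovs_eq, List.length_flatMap]
  simp only [pvCubos, List.map_cons, List.map_nil, List.sum_cons, List.sum_nil]
  have h1 := hG "A"; have h2 := hG "B"; have h3 := hG "C"
  omega

theorem pvState_insert_A {e0 : PySem.Dict String String} (hk : pvKeysABC e0) (a b c x : String) :
    (pvState e0 a b c).insert "A" x = pvState e0 x b c := by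
  have hc : (pvState e0 a b c).contains "A" = true := by
    rw [PySem.Dict.contains_iff_mem_keys, pvState_keys]; exact hk.1
  apply PySem.Dict.ext
  rw [PySem.Dict.items_insert_of_contains _ _ hc]
  show (e0.items.map (pvSubst a b c)).map (fun p => if p.1 == "A" then ("A", x) else p)
      = e0.items.map (pvSubst x b c)
  rw [List.map_map]
  refine List.map_congr_left (fun p _ => ?_)
  simp only [Function.comp_apply, pvSubst]
  by_cases h1 : p.1 == "A" <;> by_cases h2 : p.1 == "B" <;> by_cases h3 : p.1 == "C" <;>
    simp [h1, h2, h3]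

theorem pvState_insert_B {e0 : PySem.Dict String String} (hk : pvKeysABC e0) (a b c x : String) :
    (pvState e0 a b c).insert "B" x = pvState e0 a x c := by
  have hc : (pvState e0 a b c).contains "B" = true := by
    rw [PySem.Dict.contains_iff_mem_keys, pvState_keys]; exact hk.2.1
  apply PySem.Dict.ext
  rw [PySem.Dict.items_insert_of_contains _ _ hc]
  show (e0.items.map (pvSubst a b c)).map (fun p => if p.1 == "B" then ("B", x) else p)
      = e0.items.map (pvSubst a x c)
  rw [List.map_map]
  refine List.map_congr_left (fun p _ => ?_)
  simp only [Function.comp_apply, pvSubst]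
  by_cases h1 : p.1 == "A" <;> by_cases h2 : p.1 == "B" <;> by_cases h3 : p.1 == "C" <;>
    simp [h1, h2, h3]

theorem pvState_insert_C {e0 : PySem.Dict String String} (hk : pvKeysABC e0) (a b c x : String) :
    (pvState e0 a b c).insert "C" x = pvState e0 a b x := by
  have hc : (pvState e0 a b c).contains "C" = true := by
    rw [PySem.Dict.contains_iff_mem_keys, pvState_keys]; exact hk.2.2
  apply PySem.Dict.ext
  rw [PySem.Dict.items_insert_of_contains _ _ hc]
  show (e0.items.map (pvSubst a b c)).map (fun p => if p.1 == "C" then ("C", x) else p)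
      = e0.items.map (pvSubst a b x)
  rw [List.map_map]
  refine List.map_congr_left (fun p _ => ?_)
  simp only [Function.comp_apply, pvSubst]
  by_cases h1 : p.1 == "A" <;> by_cases h2 : p.1 == "B" <;> by_cases h3 : p.1 == "C" <;>
    simp [h1, h2, h3]

theorem pvSt_mover {e0 e : PySem.Dict String String} (hk : pvKeysABC e0)
    (hSt : pvSt e0 e) {m : String × String} (hm : m ∈ pvMovimientosValidos e) :
    pvSt e0 (pvMoverCubo e m.1 m.2) := by
  obtain ⟨a, ha, b, hb, c, hc, rfl⟩ := hSt
  obtain ⟨h1, h2⟩ := pvMovs_mem hm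
  have hm2 : m.2 ∈ pvVL e0 := by
    rcases h2 with h | h
    · simp [pvVL, h]
    · simp only [pvCubos, List.mem_cons, List.not_mem_nil, or_false] at h
      rcases h with h | h | h <;> simp [pvVL, h]
  unfold pvMoverCubo
  simp only [pvCubos, List.mem_cons, List.not_mem_nil, or_false] at h1
  rcases h1 with h1 | h1 | h1 <;> rw [h1]
  · rw [pvState_insert_A hk]; exact ⟨m.2, hm2, b, hb, c, hc, rfl⟩
  · rw [pvState_insert_B hk]; exact ⟨a, ha, m.2, hm2, c, hc, rfl⟩
  · rw [pvState_insert_C hk]; exact ⟨a, ha, b, hb, m.2, hm2, rfl⟩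

theorem pvClave_mem_all {e0 e : PySem.Dict String String} (hSt : pvSt e0 e) :
    pvClave e ∈ pvAll e0 := by
  obtain ⟨a, ha, b, hb, c, hc, rfl⟩ := hSt
  unfold pvAll
  exact List.mem_flatMap.2 ⟨a, ha, List.mem_flatMap.2 ⟨b, hb, List.mem_map.2 ⟨c, hc, rfl⟩⟩⟩

theorem pvState_self {e0 : PySem.Dict String String} (hnd : e0.keys.Nodup) :
    pvState e0 (e0.getD "A" "") (e0.getD "B" "") (e0.getD "C" "") = e0 := by
  apply PySem.Dict.ext
  show e0.items.map (pvSubst _ _ _) = e0.items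
  conv_rhs => rw [← List.map_id e0.items]
  refine List.map_congr_left (fun p hp => ?_)
  obtain ⟨p1, p2⟩ := p
  simp only [pvSubst, id]
  by_cases h1 : p1 == "A"
  · have h1' : p1 = "A" := by simpa using h1
    subst h1'
    simp only [beq_self_eq_true, if_true]
    rw [PySem.Dict.getD_of_mem_items e0 hp hnd ""]
  · by_cases h2 : p1 == "B"
    · have h2' : p1 = "B" := by simpa using h2
      subst h2'
      simp only [show (("B" : String) == "A") = false from by decide, beq_self_eq_true,
        Bool.false_eq_true, if_false, if_true]
      rw [PySem.Dict.getD_of_mem_items e0 hp hnd ""]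
    · by_cases h3 : p1 == "C"
      · have h3' : p1 = "C" := by simpa using h3
        subst h3'
        simp only [show (("C" : String) == "A") = false from by decide,
          show (("C" : String) == "B") = false from by decide, beq_self_eq_true,
          Bool.false_eq_true, if_false, if_true]
        rw [PySem.Dict.getD_of_mem_items e0 hp hnd ""]
      · simp [h1, h2, h3]

theorem pvSt_self {e0 : PySem.Dict String String} (hnd : e0.keys.Nodup) :
    pvSt e0 e0 := by
  refine ⟨e0.getD "A" "", by simp [pvVL], e0.getD "B" "", by simp [pvVL], e0.getD "C" "", by simp [pvVL], (pvState_self hnd).symm⟩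

theorem pvInv_le {e0 : PySem.Dict String String} {v : List (List (String × String))}
    (h : pvInv e0 v) : v.length ≤ pvM e0 := by
  have h1 : v.toFinset.card = v.length := List.toFinset_card_of_nodup h.1
  have hsub : v.toFinset ⊆ (pvAll e0).toFinset :=
    fun x hx => List.mem_toFinset.mpr (h.2 x (List.mem_toFinset.mp hx))
  calc v.length = v.toFinset.card := h1.symm
    _ ≤ (pvAll e0).toFinset.card := Finset.card_le_card hsub
    _ ≤ (pvAll e0).length := List.toFinset_card_le _

theorem pvInv_lt {e0 : PySem.Dict String String} {v : List (List (String × String))}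
    {x : List (String × String)} (h : pvInv e0 v) (hx : x ∈ pvAll e0) (hxv : x ∉ v) :
    v.length < pvM e0 := by
  have h1 : v.toFinset.card = v.length := List.toFinset_card_of_nodup h.1
  have hsub : v.toFinset ⊆ (pvAll e0).toFinset :=
    fun y hy => List.mem_toFinset.mpr (h.2 y (List.mem_toFinset.mp hy))
  have hins : insert x v.toFinset ⊆ (pvAll e0).toFinset :=
    Finset.insert_subset (List.mem_toFinset.mpr hx) hsub
  have hcard : (insert x v.toFinset).card = v.toFinset.card + 1 :=
    Finset.card_insert_of_notMem (fun hm => hxv (List.mem_toFinset.mp hm))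
  have := Finset.card_le_card hins
  have := List.toFinset_card_le (pvAll e0)
  unfold pvM
  omega

theorem pvContains_false {v : List (List (String × String))} {k : List (String × String)}
    (h : PySem.Set.contains v k = false) : k ∉ v := by
  simp [PySem.Set.contains] at h; exact h

theorem pvAdd_eq {v : List (List (String × String))} {k : List (String × String)}
    (h : PySem.Set.contains v k = false) : PySem.Set.add v k = v ++ [k] := by
  have h' := pvContains_false h
  simp [PySem.Set.add, PySem.Set.contains, h']

theorem pvInv_add {e0 : PySem.Dict String String} {v : List (List (String × String))}
    {k : List (String × String)} (h : pvInv e0 v) (hk : k ∈ pvAll e0)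
    (hc : PySem.Set.contains v k = false) : pvInv e0 (v ++ [k]) := by
  refine ⟨?_, ?_⟩
  · have h' := pvContains_false hc
    rw [List.nodup_append]
    exact ⟨h.1, List.nodup_singleton _, fun a ha b hb => by rw [List.mem_singleton] at hb; exact fun hab => h' ((hab.trans hb) ▸ ha)⟩
  · intro x hx
    rcases List.mem_append.1 hx with hx | hx
    · exact h.2 x hx
    · simp_all

theorem pvPush {α β : Type} (g : α → β) (ms : List α) (rest : List β) :
    ms.foldl (fun st m => g m :: st) rest = (ms.map g).reverse ++ rest := by
  induction ms generalizing rest with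
  | nil => simp
  | cons m ms ih => simp [List.foldl_cons, ih]

-- B's dfs only ever appends to the visited set, and keeps the invariant
theorem pvGrow (fin e0 : PySem.Dict String String) (hk : pvKeysABC e0) :
    ∀ f : Nat, ∀ (e : PySem.Dict String String) (p : List (String × String)) v,
      pvSt e0 e → pvInv e0 v →
      pvInv e0 (pvDfs fin f e p v).2 ∧ v.length ≤ (pvDfs fin f e p v).2.length := by
  intro f
  induction f with
  | zero =>
    intro e p v _ hInv
    exact ⟨by simpa [pvDfs] using hInv, by simp [pvDfs]⟩
  | succ f ih =>
    have go : ∀ (ms : List (String × String)) (e : PySem.Dict String String)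
        (p : List (String × String)), (∀ m ∈ ms, pvSt e0 (pvMoverCubo e m.1 m.2)) →
        ∀ w, pvInv e0 w →
        pvInv e0 (pvGoStep (pvDfs fin f) ms e p w).2 ∧
          w.length ≤ (pvGoStep (pvDfs fin f) ms e p w).2.length := by
      intro ms
      induction ms with
      | nil =>
        intro e p _ w hw
        exact ⟨by simpa [pvGoStep] using hw, by simp [pvGoStep]⟩
      | cons m ms ihm =>
        intro e p hms w hw
        have hchild := ih (pvMoverCubo e m.1 m.2) (p ++ [m]) w (hms m (by simp)) hw
        rcases hdf : pvDfs fin f (pvMoverCubo e m.1 m.2) (p ++ [m]) w with ⟨r, v2⟩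
        rw [hdf] at hchild
        cases r with
        | some r => simpa [pvGoStep, hdf] using hchild
        | none =>
          simp only [pvGoStep, hdf]
          have := ihm e p (fun m' hm' => hms m' (by simp [hm'])) v2 hchild.1
          exact ⟨this.1, hchild.2.trans this.2⟩
    intro e p v hSt hInv
    simp only [pvDfs]
    cases hc : PySem.Set.contains v (pvClave e) with
    | true =>
      simp only [if_true]
      exact ⟨hInv, le_rfl⟩
    | false =>
      simp only [Bool.false_eq_true, if_false]
      rw [pvAdd_eq hc]
      have hInv' : pvInv e0 (v ++ [pvClave e]) := pvInv_add hInv (pvClave_mem_all hSt) hc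
      by_cases he : pvDictEq e fin = true
      · simp only [he, if_true]
        exact ⟨hInv', by simp⟩
      · simp only [he, Bool.false_eq_true, if_false]
        have hms : ∀ m ∈ (pvMovimientosValidos e).reverse, pvSt e0 (pvMoverCubo e m.1 m.2) :=
          fun m hm => pvSt_mover hk hSt (List.mem_reverse.mp hm)
        have hgo := go (pvMovimientosValidos e).reverse e p hms (v ++ [pvClave e]) hInv'
        exact ⟨hgo.1, le_trans (by simp) hgo.2⟩

-- B's dfs gives the same answer at any two sufficient fuels
theorem pvIrr (fin e0 : PySem.Dict String String) (hk : pvKeysABC e0) :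
    ∀ n : Nat, ∀ (v : List (List (String × String))), pvM e0 + 1 - v.length ≤ n →
      ∀ (e : PySem.Dict String String) (p : List (String × String)) (f1 f2 : Nat),
      pvSt e0 e → pvInv e0 v → pvM e0 + 1 - v.length ≤ f1 → pvM e0 + 1 - v.length ≤ f2 →
      pvDfs fin f1 e p v = pvDfs fin f2 e p v := by
  intro n
  induction n using Nat.strong_induction_on with
  | _ n IH =>
  intro v hn e p f1 f2 hSt hInv h1 h2
  have hvM : v.length ≤ pvM e0 := pvInv_le hInv
  obtain ⟨a, rfl⟩ : ∃ a, f1 = a + 1 := ⟨f1 - 1, by omega⟩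
  obtain ⟨b, rfl⟩ : ∃ b, f2 = b + 1 := ⟨f2 - 1, by omega⟩
  simp only [pvDfs]
  cases hc : PySem.Set.contains v (pvClave e) with
  | true => simp
  | false =>
    simp only [Bool.false_eq_true, if_false]
    rw [pvAdd_eq hc]
    by_cases he : pvDictEq e fin = true
    · simp [he]
    · simp only [he, Bool.false_eq_true, if_false]
      have hkAll : pvClave e ∈ pvAll e0 := pvClave_mem_all hSt
      have hInv' : pvInv e0 (v ++ [pvClave e]) := pvInv_add hInv hkAll hc
      have hgoal : ∀ (ms : List (String × String)),
          (∀ m ∈ ms, pvSt e0 (pvMoverCubo e m.1 m.2)) →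
          ∀ w a' b', pvInv e0 w → v.length < w.length →
          pvM e0 + 1 - w.length ≤ a' → pvM e0 + 1 - w.length ≤ b' →
          pvGoStep (pvDfs fin a') ms e p w = pvGoStep (pvDfs fin b') ms e p w := by
        intro ms
        induction ms with
        | nil => intro _ w a' b' _ _ _ _; simp [pvGoStep]
        | cons m ms ihm =>
          intro hms w a' b' hw hlen ha' hb'
          have hchild : pvDfs fin a' (pvMoverCubo e m.1 m.2) (p ++ [m]) w
              = pvDfs fin b' (pvMoverCubo e m.1 m.2) (p ++ [m]) w :=
            IH (pvM e0 + 1 - w.length) (by omega) w le_rfl _ _ a' b'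
              (hms m (by simp)) hw ha' hb'
          simp only [pvGoStep]
          rw [hchild]
          rcases hdf : pvDfs fin b' (pvMoverCubo e m.1 m.2) (p ++ [m]) w with ⟨r, v2⟩
          have hgrow := pvGrow fin e0 hk b' (pvMoverCubo e m.1 m.2) (p ++ [m]) w
            (hms m (by simp)) hw
          rw [hdf] at hgrow
          cases r with
          | some r => rfl
          | none =>
            have hle2 : w.length ≤ v2.length := hgrow.2
            exact ihm (fun m' hm' => hms m' (by simp [hm'])) v2 a' b' hgrow.1
              (lt_of_lt_of_le hlen hle2) (by omega) (by omega)
      exact hgoal (pvMovimientosValidos e).reverse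
        (fun m hm => pvSt_mover hk hSt (List.mem_reverse.mp hm))
        (v ++ [pvClave e]) a b hInv' (by simp) (by simp; omega) (by simp; omega)

theorem pvGo_eq_runL (fin e0 : PySem.Dict String String) (hk : pvKeysABC e0)
    (e : PySem.Dict String String) (p : List (String × String)) :
    ∀ (ms : List (String × String)), (∀ m ∈ ms, pvSt e0 (pvMoverCubo e m.1 m.2)) →
    ∀ v (f1 f2 : Nat), pvInv e0 v → pvM e0 + 1 ≤ f1 → pvM e0 + 1 ≤ f2 →
      pvGoStep (pvDfs fin f1) ms e p v =
        pvRunL fin f2 (ms.map (fun m => (pvMoverCubo e m.1 m.2, p ++ [m]))) v := by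
  intro ms
  induction ms with
  | nil => intro _ v f1 f2 _ _ _; simp [pvGoStep, pvRunL]
  | cons m ms ihm =>
    intro hms v f1 f2 hv hf1 hf2
    simp only [pvGoStep, List.map_cons, pvRunL]
    have heq : pvDfs fin f1 (pvMoverCubo e m.1 m.2) (p ++ [m]) v
        = pvDfs fin f2 (pvMoverCubo e m.1 m.2) (p ++ [m]) v :=
      pvIrr fin e0 hk (pvM e0 + 1 - v.length) v le_rfl _ _ f1 f2
        (hms m (by simp)) hv (by omega) (by omega)
    rw [heq]
    rcases hdf : pvDfs fin f2 (pvMoverCubo e m.1 m.2) (p ++ [m]) v with ⟨r, v2⟩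
    have hgrow := pvGrow fin e0 hk f2 (pvMoverCubo e m.1 m.2) (p ++ [m]) v
      (hms m (by simp)) hv
    rw [hdf] at hgrow
    cases r with
    | some r => rfl
    | none => exact ihm (fun m' hm' => hms m' (by simp [hm'])) v2 f1 f2 hgrow.1 hf1 hf2

theorem pvRunL_append (fin : PySem.Dict String String) (f : Nat) :
    ∀ (xs ys : List (PySem.Dict String String × List (String × String))) v,
    pvRunL fin f (xs ++ ys) v =
      match pvRunL fin f xs v with
      | (some r, v2) => (some r, v2)
      | (none, v2) => pvRunL fin f ys v2 := by
  intro xs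
  induction xs with
  | nil => intro ys v; simp [pvRunL]
  | cons q xs ih =>
    intro ys v
    obtain ⟨e, p⟩ := q
    simp only [List.cons_append, pvRunL]
    rcases h : pvDfs fin f e p v with ⟨r, v2⟩
    cases r <;> simp [ih]

-- the simulation: A's stack loop computes exactly B's sequential dfs over the stack
theorem pvSim (fin e0 : PySem.Dict String String) (hk : pvKeysABC e0) :
    ∀ fA : Nat, ∀ (stack : List (PySem.Dict String String × List (String × String))) v (fB : Nat),
      (∀ q ∈ stack, pvSt e0 q.1) → pvInv e0 v →
      10 * (pvM e0 - v.length) + stack.length + 1 ≤ fA → pvM e0 + 2 ≤ fB →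
      pvLoopA fin fA stack v = (pvRunL fin fB stack v).1 := by
  intro fA
  induction fA using Nat.strong_induction_on with
  | _ fA IH =>
  intro stack v fB hstk hInv hfA hfB
  obtain ⟨a, rfl⟩ : ∃ a, fA = a + 1 := ⟨fA - 1, by omega⟩
  obtain ⟨b, rfl⟩ : ∃ b, fB = b + 1 := ⟨fB - 1, by omega⟩
  cases stack with
  | nil => simp [pvLoopA, pvRunL]
  | cons q rest =>
    obtain ⟨e, p⟩ := q
    have hSt : pvSt e0 e := hstk (e, p) (by simp)
    simp only [pvLoopA, pvRunL, pvDfs]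
    cases hc : PySem.Set.contains v (pvClave e) with
    | true =>
      simp only [if_true]
      have hrest := IH a (by omega) rest v (b + 1)
        (fun q hq => hstk q (by simp [hq])) hInv (by simp at hfA ⊢; omega) hfB
      simpa [pvRunL] using hrest
    | false =>
      simp only [Bool.false_eq_true, if_false]
      rw [pvAdd_eq hc]
      have hkAll : pvClave e ∈ pvAll e0 := pvClave_mem_all hSt
      have hInv' : pvInv e0 (v ++ [pvClave e]) := pvInv_add hInv hkAll hc
      have hlt : v.length < pvM e0 := pvInv_lt hInv hkAll (pvContains_false hc)
      by_cases he : pvDictEq e fin = true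
      · simp [he]
      · simp only [he, Bool.false_eq_true, if_false]
        have hmlen := pvMovs_len e
        have hstk' : ∀ q ∈ (((pvMovimientosValidos e).map
            (fun m => (pvMoverCubo e m.1 m.2, p ++ [m]))).reverse ++ rest), pvSt e0 q.1 := by
          intro q hq
          rcases List.mem_append.1 hq with hq | hq
          · rcases List.mem_map.1 (List.mem_reverse.mp hq) with ⟨m, hm, rfl⟩
            exact pvSt_mover hk hSt hm
          · exact hstk q (by simp [hq])
        rw [pvPush (fun m => (pvMoverCubo e m.1 m.2, p ++ [m])) (pvMovimientosValidos e) rest]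
        have hmain := IH a (by omega)
          (((pvMovimientosValidos e).map (fun m => (pvMoverCubo e m.1 m.2, p ++ [m]))).reverse ++ rest)
          (v ++ [pvClave e]) (b + 1) hstk' hInv'
          (by simp only [List.length_append, List.length_reverse, List.length_map,
                List.length_cons] at hfA ⊢; omega) hfB
        rw [hmain]
        rw [show ((pvMovimientosValidos e).map
              (fun m => (pvMoverCubo e m.1 m.2, p ++ [m]))).reverse
            = ((pvMovimientosValidos e).reverse.map
              (fun m => (pvMoverCubo e m.1 m.2, p ++ [m]))) from by rw [List.map_reverse]]
        rw [pvRunL_append]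
        rw [← pvGo_eq_runL fin e0 hk e p (pvMovimientosValidos e).reverse
          (fun m hm => pvSt_mover hk hSt (List.mem_reverse.mp hm))
          (v ++ [pvClave e]) b (b + 1) hInv' (by omega) (by omega)]

-- ===== VERDICT (by name: the statement is the Claim_ definition above) =====
theorem resolver_cubos_spec : Claim_equal_resolver_cubos := by
  intro ei ef _hdom hpre
  unfold Spec_resolver_cubos
  obtain ⟨hnd1, _hnd2, hcase⟩ := hpre
  rcases hcase with ⟨hA, hB, hC⟩ | heq
  · -- search case: keys "A","B","C" are present in the initial state
    have hkeys : pvKeysABC ⟨ei⟩ := ⟨hA, hB, hC⟩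
    have hnd0 : (PySem.Dict.keys (⟨ei⟩ : PySem.Dict String String)).Nodup := hnd1
    have hSt : pvSt ⟨ei⟩ (⟨ei⟩ : PySem.Dict String String) := pvSt_self hnd0
    have hM := pvM_eq (⟨ei⟩ : PySem.Dict String String)
    unfold resolver_cubos resolver_cubos_alt
    have hsim := pvSim ⟨ef⟩ ⟨ei⟩ hkeys pvFuel [(⟨ei⟩, [])] PySem.Set.empty pvFuel
      (by intro q hq; rw [List.mem_singleton] at hq; rw [hq]; exact hSt)
      ⟨List.nodup_nil, by simp [PySem.Set.empty]⟩
      (by simp [PySem.Set.empty, pvFuel, hM])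
      (by simp [pvFuel, hM])
    rw [hsim]
    rcases hdf : pvDfs ⟨ef⟩ pvFuel ⟨ei⟩ [] PySem.Set.empty with ⟨r, v2⟩
    cases r <;> simp only [pvRunL, hdf]
  · -- the two dicts are already equal: both searches stop at the initial state
    unfold resolver_cubos resolver_cubos_alt
    rw [show pvFuel = 4999 + 1 from rfl]
    have hc : PySem.Set.contains (PySem.Set.empty : List (List (String × String)))
        (pvClave ⟨ei⟩) = false := by simp [PySem.Set.empty, PySem.Set.contains]
    simp [pvLoopA, pvDfs, heq]
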